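-- pv_equiv track=rewrite | github.com/mruizlopez5/practica0207_mruizlopez5 | Ejercicio4.py | palabras_linea
-- ===== SOURCE A (Python) =====
-- def palabras_linea(linea):
--     cuenta=0
--     previo=False
--     prueba=False
--
--     for caracter in linea:
--
--         if caracter>"@" and caracter<"[" or caracter>"`"and caracter<"{": #para todos los casos que caracter sea letra entra
--             previo=prueba #previo almacena el valor anterior de prueba
--             prueba=True #el caracter analizado es una letra y prueba pasa a true
--
--             if previo != prueba: #si el valor previo es false y la prueba es true significa que HA DETECTADO EL INICIO DE UNA PALABRA
--                 cuenta=cuenta+1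
--
--         else:
--             previo=prueba #previo almacena el valor anterior de prueba
--             prueba=False #el caracter analizado NO es una letra y prueba es False
--
--
--     return cuenta
-- ===== SOURCE B (Python) =====
-- def palabras_linea(linea):
--     def es_letra(c):
--         return ("@" < c < "[") or ("`" < c < "{")
--
--     cuenta = 0
--     resto = list(linea)
--     while resto:  # consume one maximal run of same-class characters per iteration
--         k = es_letra(resto[0])
--         if k:
--             cuenta += 1
--         j = 1
--         while j < len(resto) and es_letra(resto[j]) == k:
--             j += 1
--         resto = resto[j:]
--     return cuenta
-- ===== Notes on version B (the rewrite author's own statement) =====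
-- stated objective: alternative
-- what changed: Counts maximal same-class runs directly (outer loop consumes one whole run per iteration, counting it if it is a letter-run) instead of A's per-character two-flag edge-detecting state machine.
import Mathlib
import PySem

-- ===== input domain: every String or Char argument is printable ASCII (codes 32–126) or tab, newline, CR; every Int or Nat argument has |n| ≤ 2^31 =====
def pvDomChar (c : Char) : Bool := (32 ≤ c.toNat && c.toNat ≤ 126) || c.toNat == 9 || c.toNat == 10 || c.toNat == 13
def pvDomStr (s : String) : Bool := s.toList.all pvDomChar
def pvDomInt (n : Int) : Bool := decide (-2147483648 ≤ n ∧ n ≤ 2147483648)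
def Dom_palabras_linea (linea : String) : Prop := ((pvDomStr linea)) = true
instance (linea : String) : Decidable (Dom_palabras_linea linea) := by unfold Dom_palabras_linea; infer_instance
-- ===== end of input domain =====

-- B counts maximal same-class runs (consuming a whole run per step) instead of A's per-character two-flag edge detector; alternative decomposition, same result.


-- ===== PORT A =====
-- state (cuenta, previo, prueba), exactly A's loop body
def pvStepA (s : Int × Bool × Bool) (caracter : Char) : Int × Bool × Bool :=
  let (cuenta, _previo, prueba) := s
  if (('@' < caracter) && (caracter < '[')) || (('`' < caracter) && (caracter < '{')) then
    let previo := prueba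
    let prueba := true
    let cuenta := if previo != prueba then cuenta + 1 else cuenta
    (cuenta, previo, prueba)
  else
    (cuenta, prueba, false)

def palabras_linea (linea : String) : Int :=
  (linea.toList.foldl pvStepA (0, false, false)).1

-- ===== PORT B =====
def pvEsLetra (c : Char) : Bool := (('@' < c) && (c < '[')) || (('`' < c) && (c < '{'))

-- B's outer while: consume the maximal run of characters with the same class as the head
-- (the inner while advancing j is the dropWhile over the tail), count letter-runs.
def pvRunsB (resto : List Char) : Int :=
  match resto with
  | [] => 0
  | c :: rest =>
      (if pvEsLetra c then 1 else 0)
        + pvRunsB (rest.dropWhile (fun d => pvEsLetra d == pvEsLetra c))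
termination_by resto.length
decreasing_by
  exact Nat.lt_succ_of_le (List.length_dropWhile_le _ _)

def palabras_linea_alt (linea : String) : Int :=
  pvRunsB linea.toList

-- ===== PRECONDITION & SPEC =====
def Spec_palabras_linea (linea : String) (out : Int) : Prop := out = palabras_linea_alt linea
instance (linea : String) (out : Int) : Decidable (Spec_palabras_linea linea out) := by unfold Spec_palabras_linea; infer_instance

-- ===== CLAIM (what is proved, stated in full; the proofs are below) =====
def Claim_equal_palabras_linea : Prop := ∀ (linea : String), Dom_palabras_linea linea → Spec_palabras_linea linea (palabras_linea linea)

-- ===== LEMMAS AND PROOFS =====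

-- proof-only helper: the count A's state machine adds from state prueba = pru onwards
def pvG (pru : Bool) (l : List Char) : Int :=
  match l with
  | [] => 0
  | c :: rest =>
      if pvEsLetra c then (if pru then 0 else 1) + pvG true rest else pvG false rest

lemma pv_foldA_eq (l : List Char) (cnt : Int) (prev pru : Bool) :
    (l.foldl pvStepA (cnt, prev, pru)).1 = cnt + pvG pru l := by
  induction l generalizing cnt prev pru with
  | nil => simp [pvG]
  | cons c l ih =>
    by_cases h : pvEsLetra c = true
    · have hA : pvStepA (cnt, prev, pru) c
          = ((if pru != true then cnt + 1 else cnt), pru, true) := by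
        simp only [pvStepA, pvEsLetra] at h ⊢
        rw [if_pos h]
      simp only [List.foldl_cons, hA, ih, pvG, h, if_pos]
      cases pru <;> simp
      omega
    · have hA : pvStepA (cnt, prev, pru) c = (cnt, pru, false) := by
        simp only [pvStepA, pvEsLetra] at h ⊢
        rw [if_neg h]
      simp only [List.foldl_cons, hA, ih, pvG, h]
      simp

lemma pv_g_runs : ∀ (n : ℕ) (l : List Char), l.length ≤ n →
    pvG false l = pvRunsB l
      ∧ pvG true l = pvRunsB (l.dropWhile pvEsLetra)
      ∧ pvRunsB (l.dropWhile (fun c => !pvEsLetra c)) = pvRunsB l := by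
  intro n
  induction n with
  | zero =>
    intro l hl
    have : l = [] := List.eq_nil_of_length_eq_zero (Nat.le_zero.mp hl)
    subst this
    simp [pvG, pvRunsB, List.dropWhile]
  | succ n ih =>
    intro l hl
    match l with
    | [] => simp [pvG, pvRunsB, List.dropWhile]
    | c :: rest =>
      have hr : rest.length ≤ n := Nat.lt_succ_iff.mp (by simpa using hl)
      obtain ⟨ih1, ih2, ih3⟩ := ih rest hr
      by_cases h : pvEsLetra c = true
      · have hdw : (fun d => pvEsLetra d == pvEsLetra c) = pvEsLetra := by
          funext d; rw [h]; cases pvEsLetra d <;> rfl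
        refine ⟨?_, ?_, ?_⟩
        · rw [pvG, pvRunsB, hdw]
          simp [h, ih2]
        · rw [pvG]
          simp only [h, if_pos]
          rw [List.dropWhile, h]
          simpa using ih2
        · rw [List.dropWhile, h]
          simp
      · rw [Bool.not_eq_true] at h
        have hdw : (fun d => pvEsLetra d == pvEsLetra c) = (fun d => !pvEsLetra d) := by
          funext d
          rw [h]
          cases pvEsLetra d <;> rfl
        have hruns : pvRunsB (c :: rest) = pvRunsB (rest.dropWhile (fun d => !pvEsLetra d)) := by
          rw [pvRunsB, hdw]
          simp [h]
        refine ⟨?_, ?_, ?_⟩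
        · rw [pvG]
          simp only [h, Bool.false_eq_true, ↓reduceIte]
          rw [ih1, hruns, ih3]
        · rw [pvG]
          simp only [h, Bool.false_eq_true, ↓reduceIte]
          rw [List.dropWhile, h]
          rw [ih1, hruns, ih3]
        · rw [List.dropWhile, h]
          simp only [Bool.not_false]
          rw [hruns, ih3]

-- ===== VERDICT (by name: the statement is the Claim_ definition above) =====
theorem palabras_linea_spec : Claim_equal_palabras_linea := by
  intro linea _
  unfold Spec_palabras_linea palabras_linea palabras_linea_alt
  rw [pv_foldA_eq]
  have := (pv_g_runs linea.toList.length linea.toList le_rfl).1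
  omega
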